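-- pv_equiv track=rewrite | github.com/Ryu4824/Programmers | Lv2 멀리 뛰기.py | solution
-- ===== SOURCE A (Python) =====
-- def solution(n):
--     answer = 0
--     if n%2==0:
--         for i in range(1,n//2):
--             answer = answer + (n - i*2) + i
--         answer += 2
--     else:
--         for i in range(1,n//2+1):
--             answer = answer + (n - i*2) + i
--         answer += 1
--     return answer % 1234567
-- ===== SOURCE B (Python) =====
-- def solution(n):
--     # Gauss closed form: the loop sums (n - i) for i = 1..k, where k is the
--     # number of loop iterations; sum = k*n - k*(k+1)//2, plus the tail constant.
--     if n % 2 == 0: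
--         k, base = n // 2 - 1, 2
--     else:
--         k, base = n // 2, 1
--     if k < 0:
--         k = 0
--     return (k * n - k * (k + 1) // 2 + base) % 1234567
-- ===== Notes on version B (the rewrite author's own statement) =====
-- stated objective: faster
-- what changed: Replaces the O(n) summation loop with the Gauss closed form k*n - k*(k+1)//2 plus the tail constant, then one mod.
import Mathlib
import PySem

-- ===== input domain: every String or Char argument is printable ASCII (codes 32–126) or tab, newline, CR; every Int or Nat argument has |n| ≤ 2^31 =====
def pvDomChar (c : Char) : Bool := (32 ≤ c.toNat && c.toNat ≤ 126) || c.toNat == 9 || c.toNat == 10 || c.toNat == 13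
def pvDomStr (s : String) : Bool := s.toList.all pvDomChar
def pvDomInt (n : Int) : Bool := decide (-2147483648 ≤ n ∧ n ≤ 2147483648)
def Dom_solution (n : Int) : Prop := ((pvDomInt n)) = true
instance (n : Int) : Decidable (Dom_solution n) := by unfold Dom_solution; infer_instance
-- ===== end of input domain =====

-- B replaces A's O(n) summation loop with the Gauss closed form (O(1)); equal results proved on Dom.


-- ===== PORT A =====
def solution (n : Int) : Int :=
  if PySem.Int.mod n 2 = 0 then
    PySem.Int.mod
      (((PySem.List.pyRange 1 (PySem.Int.floordiv n 2) 1).foldl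
          (fun answer i => answer + (n - i * 2) + i) 0) + 2) 1234567
  else
    PySem.Int.mod
      (((PySem.List.pyRange 1 (PySem.Int.floordiv n 2 + 1) 1).foldl
          (fun answer i => answer + (n - i * 2) + i) 0) + 1) 1234567

-- ===== PORT B =====
def solution_alt (n : Int) : Int :=
  let k0 : Int := if PySem.Int.mod n 2 = 0 then PySem.Int.floordiv n 2 - 1 else PySem.Int.floordiv n 2
  let base : Int := if PySem.Int.mod n 2 = 0 then 2 else 1
  let k : Int := if k0 < 0 then 0 else k0
  PySem.Int.mod (k * n - PySem.Int.floordiv (k * (k + 1)) 2 + base) 1234567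

-- ===== PRECONDITION & SPEC =====
def Spec_solution (n : Int) (out : Int) : Prop := out = solution_alt n
instance (n : Int) (out : Int) : Decidable (Spec_solution n out) := by unfold Spec_solution; infer_instance

-- ===== CLAIM (what is proved, stated in full; the proofs are below) =====
def Claim_equal_solution : Prop := ∀ (n : Int), Dom_solution n → Spec_solution n (solution n)

-- ===== LEMMAS AND PROOFS =====

-- Closed form of A's loop: summing (n - 2i) + i over i = 1..k gives k*n - k*(k+1)/2.
theorem fold_closed (n : Int) : ∀ (k : Nat) (acc : Int),
    (PySem.List.pyRange 1 (1 + (k : Int)) 1).foldl (fun a i => a + (n - i * 2) + i) acc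
      = acc + (k : Int) * n - ((k : Int) * ((k : Int) + 1)) / 2 := by
  intro k
  induction k with
  | zero => intro acc; simp [PySem.List.pyRange_one_eq_nil]
  | succ k ih =>
    intro acc
    have hb : (1 + ((k + 1 : Nat) : Int)) = (1 + (k : Int)) + 1 := by push_cast; ring
    rw [hb, PySem.List.pyRange_one_succ_right (by omega), List.foldl_append, ih]
    obtain ⟨t, ht⟩ := Int.even_mul_succ_self (k : Int)
    have h1 : ((k : Int) * ((k : Int) + 1)) / 2 = t := by omega
    have h2 : (((k + 1 : Nat) : Int) * (((k + 1 : Nat) : Int) + 1)) / 2 = t + ((k : Int) + 1) := by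
      have : ((k + 1 : Nat) : Int) * (((k + 1 : Nat) : Int) + 1) = (t + ((k : Int) + 1)) + (t + ((k : Int) + 1)) := by
        push_cast; ring_nf; ring_nf at ht; omega
      omega
    simp only [List.foldl_cons, List.foldl_nil, h1, h2]
    push_cast; ring

-- ===== VERDICT (by name: the statement is the Claim_ definition above) =====
theorem solution_spec : Claim_equal_solution := by
  intro n _
  unfold Spec_solution solution solution_alt
  have hfd : ∀ a : Int, PySem.Int.floordiv a 2 = a / 2 := fun a =>
    PySem.Int.floordiv_eq_ediv_of_pos (by omega)
  by_cases hpar : PySem.Int.mod n 2 = 0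
  · simp only [hpar, if_true]
    by_cases hle : PySem.Int.floordiv n 2 - 1 < 0
    · rw [PySem.List.pyRange_one_eq_nil (by omega), if_pos hle]
      simp only [List.foldl_nil, zero_mul, zero_add, mul_one, zero_sub]
      rw [hfd]
      norm_num
    · obtain ⟨k, hk⟩ : ∃ k : Nat, PySem.Int.floordiv n 2 = 1 + (k : Int) :=
        ⟨(PySem.Int.floordiv n 2 - 1).toNat, by omega⟩
      rw [hk, fold_closed n k 0, if_neg (by omega : ¬ ((1 : Int) + (k : Int) - 1 < 0))]
      have h1 : (1 : Int) + (k : Int) - 1 = (k : Int) := by ring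
      rw [h1, hfd]
      congr 1
      ring
  · simp only [hpar, if_false]
    by_cases hle : PySem.Int.floordiv n 2 < 0
    · rw [PySem.List.pyRange_one_eq_nil (by omega), if_pos hle]
      simp only [List.foldl_nil, zero_mul, zero_add, mul_one, zero_sub]
      rw [hfd]
      norm_num
    · obtain ⟨k, hk⟩ : ∃ k : Nat, PySem.Int.floordiv n 2 = (k : Int) :=
        ⟨(PySem.Int.floordiv n 2).toNat, by omega⟩
      rw [hk]
      have hb : (k : Int) + 1 = 1 + (k : Int) := by ring
      rw [hb, fold_closed n k 0, if_neg (by omega : ¬ ((k : Int) < 0)), hfd]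
      congr 1
      ring
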